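-- pv_equiv track=rewrite | github.com/SashaNullptr/Google-Foo-Bar | solution_1.py | max_sequence_length
-- ===== SOURCE A (Python) =====
-- def get_all_substrings( string ):
--     """
--     Build a list of all valid substrings of a given string.
--
--     The continuity condition given in the problem implies that each string can
--     be modeled as a repeated sequence of smaller strings. This function computes
--     every possible substring formed by a given string and then filters based on
--     the condition that the substring needs to "fit" in the original string by
--     being repeated n times. That is the length of the string is evenly divisible
--     by the length of the substring.
--     """
--     str_len = len( string )
--     return [ string[i:j+1] for i in range(str_len) for j in range(i,str_len) if str_len%len(string[i:j+1]) == 0 ]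
--
-- def string_shift( string, n ):
--     """
--     Shift all characters in a string over by n places, allowing wrapping.
--
--     If a character had an index 'n' it will be assigned a new index n modulo length(string).
--     """
--     return string[n:] + string[:n]
--
-- def max_sequence_length( string ):
--     """
--     Compute the maximum number of times a substring can be repeated in a given string.
--
--     We need to be careful to take into account the cylical nature of the problem.
--     We not only need to consider the string in its original form, but every barrel
--     shifted version of the string.
--
--     That is we want to get the same answer if we altered the index of every
--     character in our original string by char[n] <- char[(n+k)%len(string)] for any k.
--
--     In this way we can view our function as applying to a group of chars modulo length(string)
--     instead of a single string.
--     """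
--
--     sub_strings = get_all_substrings( string )
--     str_len = len(string)
--
--     # We will use a running maximum sequence length that will we updates for each substring.
--     max_seq_length = 0
--
--     # Our general strategy will be to build a complete string by repeating a valid
--     # substring enough times to get to the length of the original string.
--     # For example if our original string was "abcabc" and our substring was
--     # "abc" we would simply repeat it twice.
--     for sub_string in sub_strings:
--
--         sub_str_len = len( sub_string )
--
--          # Compute how many times we need to repeat the substring to get to the
--          # original string size. We already know that str_len % sub_str_len = 0
--          # so there is no danger of an ambigous interger division.
--         repeat_size = str_len//sub_str_len
--
--         repeated_sub_string = ''.join([sub_string * repeat_size])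
--
--         current_seq_length = 0
--
--         # We now need to handle the cylical problem mentioned earlier.
--         # We will barrel shift the original string one step at a time a total
--         # of length( string ) times. At each step we will see if our repeated
--         # string matches the barrel shifted copy of the original string.
--         # If we detect a match we know exactly how many times the repeated substring
--         # appears, namely length(string)/length(substring).
--         for idx in range( str_len ):
--             wrapped_substring = string_shift( string, idx )
--
--             if repeated_sub_string == wrapped_substring:
--                 current_seq_length = repeat_size
--                 break
--
--         # Check to see if the number of repeated enteries is greater than our running maximum
--         max_seq_length = current_seq_length if ( current_seq_length > max_seq_length ) else max_seq_length
--
--     return max_seq_length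
-- ===== SOURCE B (Python) =====
-- def max_sequence_length(string):
--     # The repeated substring matches some rotation of the string iff the string
--     # itself is cyclically periodic with that period, so it suffices to test,
--     # for each divisor d of len(string) in increasing order, whether the string
--     # equals its own length-d prefix repeated.
--     n = len(string)
--     for d in range(1, n + 1):
--         if n % d == 0 and string[:d] * (n // d) == string:
--             return n // d
--     return 0
-- ===== Notes on version B (the rewrite author's own statement) =====
-- stated objective: faster
-- what changed: A enumerates all O(n^2) substrings and, for each, builds the repeated string and compares it against all n rotations; B uses the fact that a repeated substring matches some rotation iff the string is cyclically periodic, so it only scans divisors d of n in increasing order and checks string == string[:d]*(n//d), returning at the first (hence optimal) divisor.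
import Mathlib
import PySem

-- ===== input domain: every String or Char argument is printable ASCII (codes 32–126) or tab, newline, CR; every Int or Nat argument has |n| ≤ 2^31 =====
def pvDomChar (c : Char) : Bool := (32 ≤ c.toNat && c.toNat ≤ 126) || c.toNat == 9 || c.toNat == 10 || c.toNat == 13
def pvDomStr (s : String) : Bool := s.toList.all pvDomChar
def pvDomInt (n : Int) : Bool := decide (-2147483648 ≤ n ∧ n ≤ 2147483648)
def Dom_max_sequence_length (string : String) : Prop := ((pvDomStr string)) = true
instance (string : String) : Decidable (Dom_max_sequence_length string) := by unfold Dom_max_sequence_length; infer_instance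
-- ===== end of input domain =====

-- B replaces A's scan of all substrings × all rotations by a scan of the divisors of the
-- length only (a repeated substring matches a rotation iff the string is cyclically periodic).

-- ===== PORT A =====

-- helper string_shift: string[n:] + string[:n]
def pvShift (l : List Char) (n : Int) : List Char :=
  PySem.List.slice l (some n) none ++ PySem.List.slice l none (some n)

-- helper get_all_substrings: [ string[i:j+1] for i in range(n) for j in range(i,n) if n % len(string[i:j+1]) == 0 ]
def pvAllSubstrings (l : List Char) : List (List Char) :=
  (PySem.List.pyRange 0 (l.length : Int) 1).foldl (fun acc i =>
    acc ++ (PySem.List.pyRange i (l.length : Int) 1).foldl (fun acc2 j =>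
      if PySem.Int.mod (l.length : Int) ((PySem.List.slice l (some i) (some (j + 1))).length : Int) == 0
      then acc2 ++ [PySem.List.slice l (some i) (some (j + 1))]
      else acc2) []) []

def max_sequence_length (string : String) : Int :=
  let l := string.toList
  let subStrings := pvAllSubstrings l
  let strLen : Int := (l.length : Int)
  subStrings.foldl (fun maxSeqLength subString =>
    let subStrLen : Int := (subString.length : Int)
    let repeatSize : Int := PySem.Int.floordiv strLen subStrLen
    let repeatedSubString := PySem.List.pyRepeat subString repeatSize
    let currentSeqLength : Int :=
      if (PySem.List.pyRange 0 strLen 1).any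
           (fun idx => pvShift l idx == repeatedSubString)
      then repeatSize else 0
    if currentSeqLength > maxSeqLength then currentSeqLength else maxSeqLength) 0

-- ===== PORT B =====

-- for d in range(1, n+1): if n % d == 0 and string[:d] * (n // d) == string: return n // d
def pvBLoop (l : List Char) (n : Nat) : List Nat → Int
  | [] => 0
  | d :: ds =>
      if n % d == 0 && (PySem.List.pyRepeat (l.take d) ((n / d : Nat) : Int) == l)
      then ((n / d : Nat) : Int)
      else pvBLoop l n ds

def max_sequence_length_alt (string : String) : Int :=
  let l := string.toList
  pvBLoop l l.length (List.range' 1 l.length)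

-- ===== PRECONDITION & SPEC =====
def Spec_max_sequence_length (string : String) (out : Int) : Prop := out = max_sequence_length_alt string
instance (string : String) (out : Int) : Decidable (Spec_max_sequence_length string out) := by unfold Spec_max_sequence_length; infer_instance

-- ===== CLAIM (what is proved, stated in full; the proofs are below) =====
def Claim_equal_max_sequence_length : Prop := ∀ (string : String), Dom_max_sequence_length string → Spec_max_sequence_length string (max_sequence_length string)

-- ===== LEMMAS AND PROOFS =====

-- 'l is cyclically periodic with period d' as a Bool (d > 0, d divides |l|, l = l[:d] * (|l|/d))
def pvGood (l : List Char) (d : Nat) : Bool :=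
  decide (0 < d) && (l.length % d == 0) &&
    (l == (List.replicate (l.length / d) (l.take d)).flatten)

lemma pvGood_iff (l : List Char) (d : Nat) :
    pvGood l d = true ↔
      0 < d ∧ d ∣ l.length ∧ l = (List.replicate (l.length / d) (l.take d)).flatten := by
  simp only [pvGood, Bool.and_eq_true, decide_eq_true_eq, beq_iff_eq, and_assoc]
  rw [Nat.dvd_iff_mod_eq_zero]

lemma pvGood_exists (l : List Char) : ∃ d, pvGood l d = true := by
  rcases eq_or_ne l [] with h | h
  · exact ⟨1, by simp [h, pvGood]⟩
  · have hp : 0 < l.length := List.length_pos_iff.2 h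
    refine ⟨l.length, (pvGood_iff _ _).2 ⟨hp, dvd_rfl, ?_⟩⟩
    simp [Nat.div_self hp]

-- the least cyclic period of l (1 for the empty list)
def pvD0 (l : List Char) : Nat := Nat.find (pvGood_exists l)

lemma pvLenFlattenRep (k : Nat) (v : List Char) :
    ((List.replicate k v).flatten).length = k * v.length := by
  induction k with
  | zero => simp
  | succ k ih => simp [List.replicate_succ, ih, Nat.succ_mul]; ring

lemma pvGetFlattenRep (k : Nat) (v : List Char) (j : Nat) (hj : j < k * v.length) :
    ((List.replicate k v).flatten)[j]? = v[j % v.length]? := by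
  induction k generalizing j with
  | zero => omega
  | succ k ih =>
      rw [Nat.succ_mul] at hj
      rw [List.replicate_succ, List.flatten_cons, List.getElem?_append]
      by_cases h : j < v.length
      · simp [h, Nat.mod_eq_of_lt h]
      · rcases Nat.eq_zero_or_pos v.length with h0 | h0
        · rw [h0] at hj; simp at hj
        · rw [if_neg h, ih (j - v.length) (by omega),
            show j % v.length = (j - v.length) % v.length from Nat.mod_eq_sub_mod (by omega)]

lemma pvGetRot (l : List Char) (i j : Nat) (hi : i ≤ l.length) (hj : j < l.length) :
    (l.drop i ++ l.take i)[j]? = l[(j + i) % l.length]? := by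
  rw [List.getElem?_append]
  simp only [List.length_drop]
  by_cases h : j < l.length - i
  · rw [if_pos h, List.getElem?_drop,
      show (j + i) % l.length = i + j by rw [Nat.mod_eq_of_lt (by omega)]; omega]
  · rw [if_neg h, List.getElem?_take_of_lt (show j - (l.length - i) < i by omega),
      show (j + i) % l.length = j - (l.length - i) by
        rw [Nat.mod_eq_sub_mod (by omega), Nat.mod_eq_of_lt (by omega)]; omega]

lemma pvGood_pointwise (l : List Char) (d : Nat) (hd : 0 < d) (hdvd : d ∣ l.length)
    (hpt : ∀ m, m < l.length → l[m]? = l[m % d]?) :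
    pvGood l d = true := by
  rcases Nat.eq_zero_or_pos l.length with h0 | h0
  · refine (pvGood_iff _ _).2 ⟨hd, hdvd, ?_⟩
    rw [h0, Nat.zero_div]
    simp [List.length_eq_zero_iff.1 h0]
  · refine (pvGood_iff _ _).2 ⟨hd, hdvd, ?_⟩
    have hdle : d ≤ l.length := Nat.le_of_dvd h0 hdvd
    have htl : (l.take d).length = d := by simp [Nat.min_eq_left hdle]
    have hlen : (List.replicate (l.length / d) (l.take d)).flatten.length = l.length := by
      rw [pvLenFlattenRep, htl, Nat.div_mul_cancel hdvd]
    apply List.ext_getElem?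
    intro j
    by_cases hj : j < l.length
    · rw [pvGetFlattenRep _ _ _ (by rw [htl, Nat.div_mul_cancel hdvd]; exact hj), htl,
        List.getElem?_take_of_lt (Nat.mod_lt _ hd), hpt j hj]
    · rw [List.getElem?_eq_none (by omega), List.getElem?_eq_none (by omega)]

lemma pvGood_of_rot (l v : List Char) (i k : Nat) (hi : i ≤ l.length) (hv : 0 < v.length)
    (h : l.drop i ++ l.take i = (List.replicate k v).flatten) :
    pvGood l v.length = true := by
  set n := l.length with hn
  set d := v.length with hd
  have hlen : n = k * d := by
    have h2 := congrArg List.length h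
    simp at h2
    rw [← hd] at h2
    omega
  rcases Nat.eq_zero_or_pos n with h0 | h0
  · have hnil : l = [] := List.length_eq_zero_iff.1 h0
    subst hnil
    simp [pvGood, hv]
  · have hdvd : d ∣ n := by
      have hk : d ∣ k * d := dvd_mul_left d k
      rwa [← hlen] at hk
    have hpt2 : ∀ m, m < n → l[m]? = v[(m + (n - i)) % d]? := by
      intro m hm
      have hj : (m + (n - i)) % n < n := Nat.mod_lt _ h0
      have h1 := pvGetRot l i ((m + (n - i)) % n) hi hj
      rw [h] at h1
      rw [pvGetFlattenRep k v _ (by rw [← hd]; omega)] at h1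
      rw [show ((m + (n - i)) % n + i) % n = m by
            rw [Nat.mod_add_mod, show m + (n - i) + i = m + n by omega,
              Nat.add_mod_right, Nat.mod_eq_of_lt hm]] at h1
      rw [show (m + (n - i)) % n % d = (m + (n - i)) % d from Nat.mod_mod_of_dvd _ hdvd] at h1
      exact h1.symm
    apply pvGood_pointwise l d hv hdvd
    intro m hm
    rw [hpt2 m hm, hpt2 (m % d) (by have := Nat.mod_le m d; omega),
      Nat.mod_add_mod]

-- the comprehension of A as a flatMap of filtered maps
lemma pvSubs_eq (l : List Char) : pvAllSubstrings l =
    (PySem.List.pyRange 0 (l.length : Int) 1).flatMap (fun i =>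
      ((PySem.List.pyRange i (l.length : Int) 1).filter (fun j =>
          PySem.Int.mod (l.length : Int) ((PySem.List.slice l (some i) (some (j + 1))).length : Int) == 0)).map
        (fun j => PySem.List.slice l (some i) (some (j + 1)))) := by
  unfold pvAllSubstrings
  simp only [PySem.List.foldl_append_if, List.nil_append]
  rw [PySem.List.foldl_append_eq_flatMap, List.nil_append]

lemma pvMemSubs (l sub : List Char) (h : sub ∈ pvAllSubstrings l) :
    0 < sub.length ∧ sub.length ∣ l.length := by
  rw [pvSubs_eq] at h
  simp only [List.mem_flatMap, List.mem_map, List.mem_filter, PySem.List.mem_pyRange_one] at h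
  obtain ⟨i, ⟨hi0, hin⟩, j, ⟨⟨hij, hjn⟩, hmod⟩, rfl⟩ := h
  have hsl : PySem.List.slice l (some i) (some (j + 1)) =
      (l.drop i.toNat).take ((j + 1).toNat - i.toNat) :=
    PySem.List.slice_toNat l (by omega) (by omega)
  have hlen : (PySem.List.slice l (some i) (some (j + 1))).length = (j + 1 - i).toNat := by
    rw [hsl]; simp only [List.length_take, List.length_drop]; omega
  constructor
  · omega
  · rw [beq_iff_eq, PySem.Int.mod_eq_zero_iff_dvd] at hmod
    rw [hlen]
    rw [hlen] at hmod
    exact_mod_cast hmod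

lemma pvPrefixMem (l : List Char) (d : Nat) (h1 : 0 < d) (h2 : d ≤ l.length)
    (h3 : d ∣ l.length) : l.take d ∈ pvAllSubstrings l := by
  rw [pvSubs_eq]
  simp only [List.mem_flatMap, List.mem_map, List.mem_filter, PySem.List.mem_pyRange_one]
  have hsl : PySem.List.slice l (some 0) (some ((d : Int) - 1 + 1)) = l.take d := by
    rw [show ((d : Int) - 1 + 1) = (d : Int) by ring]
    rw [PySem.List.slice_toNat l (by omega) (by omega)]
    simp
  refine ⟨0, ⟨le_refl _, by exact_mod_cast h1.trans_le h2⟩,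
    (d : Int) - 1, ⟨⟨by omega, by omega⟩, ?_⟩, hsl⟩
  rw [hsl, beq_iff_eq, PySem.Int.mod_eq_zero_iff_dvd]
  have : (l.take d).length = d := by simp [Nat.min_eq_left h2]
  rw [this]
  exact_mod_cast h3

-- the contribution of one substring to A's running maximum
def pvF (l : List Char) (sub : List Char) : Int :=
  if (PySem.List.pyRange 0 ((l.length : Int)) 1).any
       (fun idx => pvShift l idx ==
         PySem.List.pyRepeat sub (PySem.Int.floordiv (l.length : Int) (sub.length : Int)))
  then PySem.Int.floordiv (l.length : Int) (sub.length : Int) else 0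

lemma pvIte_max (m c : Int) : (if c > m then c else m) = max m c := by
  split <;> omega

lemma pvA_eval (s : String) :
    max_sequence_length s = (((pvAllSubstrings s.toList).map (pvF s.toList)).foldl max 0) := by
  show (pvAllSubstrings s.toList).foldl
      (fun m sub => if pvF s.toList sub > m then pvF s.toList sub else m) 0 = _
  rw [List.foldl_map]
  apply PySem.List.foldl_congr_mem
  intro acc x _
  exact pvIte_max acc (pvF s.toList x)

lemma pvF_le (l sub : List Char) (hm : sub ∈ pvAllSubstrings l) :
    pvF l sub ≤ ((l.length / pvD0 l : Nat) : Int) := by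
  obtain ⟨hpos, hdvd⟩ := pvMemSubs l sub hm
  unfold pvF
  split
  case isFalse => exact Int.natCast_nonneg _
  case isTrue hany =>
    rw [List.any_eq_true] at hany
    obtain ⟨idx, hidx, hbeq⟩ := hany
    rw [PySem.List.mem_pyRange_one] at hidx
    rw [beq_iff_eq] at hbeq
    unfold pvShift at hbeq
    rw [PySem.List.slice_from l hidx.1, PySem.List.slice_to l hidx.1] at hbeq
    rw [show ((sub.length : Int)) = ((sub.length : Nat) : Int) from rfl,
      PySem.Int.floordiv_natCast] at hbeq
    have hrep : PySem.List.pyRepeat sub ((l.length / sub.length : Nat) : Int) =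
        (List.replicate (l.length / sub.length) sub).flatten := by
      simp only [PySem.List.pyRepeat, Int.toNat_natCast]
    rw [hrep] at hbeq
    have hgood := pvGood_of_rot l sub idx.toNat _ (by omega) hpos hbeq
    have hle : pvD0 l ≤ sub.length := Nat.find_min' (pvGood_exists l) hgood
    have hd0pos : 0 < pvD0 l := ((pvGood_iff _ _).1 (Nat.find_spec (pvGood_exists l))).1
    rw [show ((sub.length : Int)) = ((sub.length : Nat) : Int) from rfl,
      PySem.Int.floordiv_natCast]
    exact_mod_cast Nat.div_le_div_left hle hd0pos

lemma pvF_prefix (l : List Char) (h0 : l ≠ []) :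
    pvF l (l.take (pvD0 l)) = ((l.length / pvD0 l : Nat) : Int) := by
  have hn : 0 < l.length := List.length_pos_iff.2 h0
  obtain ⟨hd0, hdvd, heq⟩ := (pvGood_iff _ _).1 (Nat.find_spec (pvGood_exists l))
  have hle : pvD0 l ≤ l.length := Nat.le_of_dvd hn hdvd
  have hlen : (l.take (pvD0 l)).length = pvD0 l := by simp [Nat.min_eq_left hle]
  unfold pvF
  rw [hlen, show ((pvD0 l : Int)) = ((pvD0 l : Nat) : Int) from rfl, PySem.Int.floordiv_natCast]
  rw [if_pos]
  rw [List.any_eq_true]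
  refine ⟨0, PySem.List.mem_pyRange_one.2 ⟨le_refl _, by exact_mod_cast hn⟩, ?_⟩
  rw [beq_iff_eq]
  unfold pvShift
  rw [PySem.List.slice_from l (le_refl 0), PySem.List.slice_to l (le_refl 0)]
  simp only [Int.toNat_zero, List.drop_zero, List.take_zero, List.append_nil]
  simp only [PySem.List.pyRepeat, Int.toNat_natCast]
  exact heq

lemma pvBLoop_eq (l : List Char) :
    ∀ (b a : Nat), 0 < a → a ≤ pvD0 l → pvD0 l < a + b →
      pvBLoop l l.length (List.range' a b) = ((l.length / pvD0 l : Nat) : Int) := by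
  intro b
  induction b with
  | zero => intro a _ h1 h2; omega
  | succ b ih =>
      intro a ha h1 h2
      rw [List.range'_succ]
      by_cases he : a = pvD0 l
      · subst he
        obtain ⟨hd0, hdvd, heq⟩ := (pvGood_iff _ _).1 (Nat.find_spec (pvGood_exists l))
        unfold pvBLoop
        rw [if_pos]
        simp only [Bool.and_eq_true, beq_iff_eq]
        refine ⟨Nat.mod_eq_zero_of_dvd hdvd, ?_⟩
        simp only [PySem.List.pyRepeat, Int.toNat_natCast]
        exact heq.symm
      · have hlt : a < pvD0 l := lt_of_le_of_ne h1 he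
        have hng := Nat.find_min (pvGood_exists l) hlt
        unfold pvBLoop
        rw [if_neg, ih (a + 1) (by omega) (by omega) (by omega)]
        intro hc
        simp only [Bool.and_eq_true, beq_iff_eq] at hc
        refine hng ((pvGood_iff _ _).2 ⟨ha, Nat.dvd_of_mod_eq_zero hc.1, ?_⟩)
        have h2 := hc.2
        simp only [PySem.List.pyRepeat, Int.toNat_natCast] at h2
        exact h2.symm

lemma pvFoldlMax_le (xs : List Int) (c : Int) (hc : 0 ≤ c) (h : ∀ x ∈ xs, x ≤ c) :
    xs.foldl max 0 ≤ c := by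
  rcases PySem.List.foldl_max_mem xs 0 with h' | h'
  · rw [h']; exact hc
  · exact h _ h'

-- ===== VERDICT (by name: the statement is the Claim_ definition above) =====
theorem max_sequence_length_spec : Claim_equal_max_sequence_length := by
  intro s _
  unfold Spec_max_sequence_length
  rcases eq_or_ne s.toList [] with h | h
  · unfold max_sequence_length max_sequence_length_alt
    rw [h]
    simp [pvAllSubstrings, pvBLoop, PySem.List.pyRange_one_eq_nil (le_refl 0)]
  · have hn : 0 < s.toList.length := List.length_pos_iff.2 h
    obtain ⟨hd0', hdvd, heq⟩ := (pvGood_iff _ _).1 (Nat.find_spec (pvGood_exists s.toList))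
    have hd0 : 0 < pvD0 s.toList := hd0'
    have hle : pvD0 s.toList ≤ s.toList.length := Nat.le_of_dvd hn hdvd
    have hB : max_sequence_length_alt s = ((s.toList.length / pvD0 s.toList : Nat) : Int) := by
      unfold max_sequence_length_alt
      exact pvBLoop_eq s.toList s.toList.length 1 (by omega) (by omega) (by omega)
    rw [hB, pvA_eval]
    apply le_antisymm
    · exact pvFoldlMax_le _ _ (Int.natCast_nonneg _)
        (fun x hx => by
          obtain ⟨sub, hsub, rfl⟩ := List.mem_map.1 hx
          exact pvF_le s.toList sub hsub)
    · have hmem : pvF s.toList (s.toList.take (pvD0 s.toList)) ∈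
          (pvAllSubstrings s.toList).map (pvF s.toList) :=
        List.mem_map_of_mem (pvPrefixMem s.toList (pvD0 s.toList) hd0 hle hdvd)
      have := (PySem.List.le_foldl_max ((pvAllSubstrings s.toList).map (pvF s.toList)) 0).2 _ hmem
      rwa [pvF_prefix s.toList h] at this
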